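-- pv_equiv track=rewrite | github.com/microsoft/transparency-engine | python/transparency-engine/transparency_engine/modules/graph/link_filtering/macro_links.py | has_long_fuzzy_chains
-- ===== SOURCE A (Python) =====
-- from typing import Dict, List, Tuple, Union
--
-- def has_long_fuzzy_chains(
--     path: List, entity_col: str, join_token: str, max_fuzzy_chain_length: int
-- ) -> int:
--     """
--     Check if a path has a long fuzzy chain.
--
--     Params:
--     -------
--         path: A list of nodes.
--         entity_col: The name of the entity column.
--
--     Returns:
--     -------
--         1 if the path has a long fuzzy chain, 0 otherwise.
--     """
--     for index in range(len(path) - max_fuzzy_chain_length - 1):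
--         node_chain = path[index : index + max_fuzzy_chain_length + 2]
--         long_fuzzy_chain = True
--         for node in node_chain:
--             if node.split(join_token)[0] == entity_col:
--                 long_fuzzy_chain = False
--                 break
--         if long_fuzzy_chain:
--             return 1
--     return 0
-- ===== SOURCE B (Python) =====
-- from typing import List
--
--
-- def has_long_fuzzy_chains(
--     path: List, entity_col: str, join_token: str, max_fuzzy_chain_length: int
-- ) -> int:
--     """Single pass: track the index of the previous entity node and report 1 as
--     soon as a gap of non-entity nodes reaches max_fuzzy_chain_length + 2.
--     Degenerate cases first: if no window of that length fits in the path there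
--     can be no long chain (0); a non-positive length makes the empty window
--     qualify trivially (1)."""
--     threshold = max_fuzzy_chain_length + 2
--     if len(path) < threshold:
--         return 0
--     if threshold <= 0:
--         return 1
--     prev = -1
--     for i, node in enumerate(path):
--         if node.split(join_token)[0] == entity_col:
--             if i - prev - 1 >= threshold:
--                 return 1
--             prev = i
--     return 1 if len(path) - prev - 1 >= threshold else 0
-- ===== Notes on version B (the rewrite author's own statement) =====
-- stated objective: alternative
-- what changed: Replaces A's rescan of every overlapping length-(L+2) window with up-front handling of the degenerate window sizes plus a single pass that splits each node once, tracks the index of the previous entity node, and reports 1 when a gap of non-entity nodes reaches max_fuzzy_chain_length + 2; it trades A's window rescans for one gap-tracking scan.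
import Mathlib
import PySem

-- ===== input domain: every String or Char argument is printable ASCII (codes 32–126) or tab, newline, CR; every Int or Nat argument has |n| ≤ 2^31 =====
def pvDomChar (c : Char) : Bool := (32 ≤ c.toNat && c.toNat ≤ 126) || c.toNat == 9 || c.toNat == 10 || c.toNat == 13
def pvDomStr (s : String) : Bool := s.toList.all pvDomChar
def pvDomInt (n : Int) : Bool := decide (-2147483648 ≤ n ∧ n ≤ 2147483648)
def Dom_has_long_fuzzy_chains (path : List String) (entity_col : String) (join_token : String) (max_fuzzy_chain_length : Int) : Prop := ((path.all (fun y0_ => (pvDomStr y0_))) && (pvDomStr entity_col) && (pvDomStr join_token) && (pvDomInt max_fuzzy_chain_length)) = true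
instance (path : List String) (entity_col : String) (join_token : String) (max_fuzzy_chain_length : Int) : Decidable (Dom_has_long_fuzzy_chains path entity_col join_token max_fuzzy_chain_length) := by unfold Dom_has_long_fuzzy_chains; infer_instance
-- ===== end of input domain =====

-- B settles the degenerate window sizes up front and otherwise replaces A's rescan of
-- every overlapping window with a single pass that splits each node once and tracks the
-- previous entity index (objective: alternative decomposition, same measured cost).

-- ===== PORT A =====
-- node.split(join_token)[0] == entity_col  (shared by both sources verbatim; split? is none
-- only for an empty join_token, on which any input that reaches a split is outside Pre_)
def pvIsEntity (entity_col : String) (join_token : String) (node : String) : Bool :=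
  (PySem.List.pyGet? ((PySem.Str.split? node join_token).getD []) 0).getD "" == entity_col

-- the inner 'for node in node_chain: … break' loop of A
def pvChainAllNonEntity (entity_col : String) (join_token : String) : List String → Bool
  | [] => true
  | n :: rest =>
    if pvIsEntity entity_col join_token n then false
    else pvChainAllNonEntity entity_col join_token rest

-- the outer 'for index in range(…)' loop of A, as a counted recursion over the index
-- (Python's range is lazy; fuel = number of remaining indices, index starts at 0)
def pvFuzzyOuterF (path : List String) (entity_col : String) (join_token : String)
    (max_fuzzy_chain_length : Int) : Nat → Int → Int
  | 0, _ => 0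
  | fuel + 1, i =>
    if pvChainAllNonEntity entity_col join_token
        (PySem.List.slice path (some i) (some (i + max_fuzzy_chain_length + 2))) then 1
    else pvFuzzyOuterF path entity_col join_token max_fuzzy_chain_length fuel (i + 1)

def has_long_fuzzy_chains (path : List String) (entity_col : String) (join_token : String) (max_fuzzy_chain_length : Int) : Int :=
  pvFuzzyOuterF path entity_col join_token max_fuzzy_chain_length
    ((path.length : Int) - max_fuzzy_chain_length - 1).toNat 0

-- ===== PORT B =====
-- B's 'for i, node in enumerate(path)' loop: prev = index of the last entity node (-1 initially)
def pvGapScan (entity_col : String) (join_token : String) (threshold : Int) (total : Int) :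
    List String → Int → Int → Int
  | [], _, prev => if threshold ≤ total - prev - 1 then 1 else 0
  | n :: rest, i, prev =>
    if pvIsEntity entity_col join_token n then
      if threshold ≤ i - prev - 1 then 1
      else pvGapScan entity_col join_token threshold total rest (i + 1) i
    else pvGapScan entity_col join_token threshold total rest (i + 1) prev

def has_long_fuzzy_chains_alt (path : List String) (entity_col : String) (join_token : String) (max_fuzzy_chain_length : Int) : Int :=
  if (path.length : Int) < max_fuzzy_chain_length + 2 then 0
  else if max_fuzzy_chain_length + 2 ≤ 0 then 1
  else pvGapScan entity_col join_token (max_fuzzy_chain_length + 2) (path.length : Int) path 0 (-1)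

-- ===== PRECONDITION & SPEC =====
-- Pre_ excludes exactly the inputs on which Python's A raises (str.split with an empty
-- separator raises ValueError): join_token = "" and the loop reaches a nonempty window,
-- i.e. unless the index range is empty (len < L+2) or the first window is empty
-- (L+2 = 0, or L+2 < 0 with len + L + 2 ≤ 0, where the negative stop wraps).
def Pre_has_long_fuzzy_chains (path : List String) (entity_col : String) (join_token : String) (max_fuzzy_chain_length : Int) : Prop :=
  join_token ≠ "" ∨ (path.length : Int) < max_fuzzy_chain_length + 2 ∨
    max_fuzzy_chain_length + 2 = 0 ∨
    (max_fuzzy_chain_length + 2 < 0 ∧ (path.length : Int) + max_fuzzy_chain_length + 2 ≤ 0)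
instance (path : List String) (entity_col : String) (join_token : String) (max_fuzzy_chain_length : Int) : Decidable (Pre_has_long_fuzzy_chains path entity_col join_token max_fuzzy_chain_length) := by unfold Pre_has_long_fuzzy_chains; infer_instance

def pvWitness_has_long_fuzzy_chains : List String × String × String × Int :=
  (["E::1", "G::2", "G::3", "E::4"], "E", "::", 0)

def Spec_has_long_fuzzy_chains (path : List String) (entity_col : String) (join_token : String) (max_fuzzy_chain_length : Int) (out : Int) : Prop := out = has_long_fuzzy_chains_alt path entity_col join_token max_fuzzy_chain_length
instance (path : List String) (entity_col : String) (join_token : String) (max_fuzzy_chain_length : Int) (out : Int) : Decidable (Spec_has_long_fuzzy_chains path entity_col join_token max_fuzzy_chain_length out) := by unfold Spec_has_long_fuzzy_chains; infer_instance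

-- ===== CLAIM (what is proved, stated in full; the proofs are below) =====
def Claim_equal_has_long_fuzzy_chains : Prop := ∀ (path : List String) (entity_col : String) (join_token : String) (max_fuzzy_chain_length : Int), Dom_has_long_fuzzy_chains path entity_col join_token max_fuzzy_chain_length → Pre_has_long_fuzzy_chains path entity_col join_token max_fuzzy_chain_length → Spec_has_long_fuzzy_chains path entity_col join_token max_fuzzy_chain_length (has_long_fuzzy_chains path entity_col join_token max_fuzzy_chain_length)

-- ===== LEMMAS AND PROOFS =====

-- A's outer loop over an explicit index list (proof-side view of pvFuzzyOuterF)
def pvFuzzyOuter (path : List String) (entity_col : String) (join_token : String)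
    (max_fuzzy_chain_length : Int) : List Int → Int
  | [] => 0
  | i :: rest =>
    if pvChainAllNonEntity entity_col join_token
        (PySem.List.slice path (some i) (some (i + max_fuzzy_chain_length + 2))) then 1
    else pvFuzzyOuter path entity_col join_token max_fuzzy_chain_length rest

lemma pvFuzzyOuterF_eq_range (path : List String) (ec jt : String) (L : Int) :
    ∀ (fuel : Nat) (i : Int), pvFuzzyOuterF path ec jt L fuel i
      = pvFuzzyOuter path ec jt L (PySem.List.pyRange i (i + fuel) 1) := by
  intro fuel
  induction fuel with
  | zero =>
    intro i
    rw [PySem.List.pyRange_one_eq_nil (by simp)]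
    rfl
  | succ f ih =>
    intro i
    rw [PySem.List.pyRange_one_cons (by push_cast; omega)]
    show pvFuzzyOuterF path ec jt L (f + 1) i = pvFuzzyOuter path ec jt L (i :: _)
    rw [pvFuzzyOuterF, pvFuzzyOuter, ih (i + 1),
      show i + 1 + (f : Int) = i + ((f : Nat) + 1 : Nat) from by push_cast; ring]

-- "some window of t consecutive nodes all satisfying q exists" (A's search, structurally)
def pvAnyWin (q : String → Bool) (t : Nat) : List String → Bool
  | [] => decide (t = 0)
  | n :: r => (decide (t ≤ r.length + 1) && ((n :: r).take t).all q) || pvAnyWin q t r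

-- length of the longest q-prefix
def pvLead (q : String → Bool) : List String → Nat
  | [] => 0
  | n :: r => if q n then pvLead q r + 1 else 0

-- B's scan, abstractly: run = number of q-nodes immediately before the current suffix
def pvWithRun (q : String → Bool) (t : Nat) : Nat → List String → Bool
  | run, [] => decide (t ≤ run)
  | run, n :: r =>
    if q n then pvWithRun q t (run + 1) r
    else (decide (t ≤ run) || pvWithRun q t 0 r)

lemma pvChainAllNonEntity_eq_all (ec jt : String) (l : List String) :
    pvChainAllNonEntity ec jt l = l.all (fun n => !pvIsEntity ec jt n) := by
  induction l with
  | nil => rfl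
  | cons n r ih => by_cases h : pvIsEntity ec jt n <;> simp [pvChainAllNonEntity, h, ih]

lemma pvFuzzyOuter_eq_any (path : List String) (ec jt : String) (L : Int) (idxs : List Int) :
    pvFuzzyOuter path ec jt L idxs
      = if idxs.any (fun i =>
          pvChainAllNonEntity ec jt (PySem.List.slice path (some i) (some (i + L + 2)))) then 1 else 0 := by
  induction idxs with
  | nil => rfl
  | cons i rest ih =>
    by_cases h : pvChainAllNonEntity ec jt (PySem.List.slice path (some i) (some (i + L + 2))) <;>
      simp [pvFuzzyOuter, h, ih]

lemma pvLead_le_length (q : String → Bool) (l : List String) : pvLead q l ≤ l.length := by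
  induction l with
  | nil => simp [pvLead]
  | cons n r ih => by_cases h : q n <;> simp [pvLead, h] <;> omega

lemma take_all_of_le_lead (q : String → Bool) (t : Nat) (l : List String)
    (h : t ≤ pvLead q l) : ∀ x ∈ l.take t, q x = true := by
  induction l generalizing t with
  | nil => simp
  | cons n r ih =>
    by_cases hq : q n
    · cases t with
      | zero => simp
      | succ t' =>
        simp [pvLead, hq] at h
        intro x hx
        rw [List.take_succ_cons] at hx
        rcases List.mem_cons.mp hx with rfl | hx'
        · exact hq
        · exact ih t' (by omega) x hx'
    · simp [pvLead, hq] at h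
      have : t = 0 := by omega
      subst this; simp

lemma lead_ge_of_take_all (q : String → Bool) (t : Nat) (l : List String)
    (hlen : t ≤ l.length) (h : ∀ x ∈ l.take t, q x = true) : t ≤ pvLead q l := by
  induction l generalizing t with
  | nil => simp at hlen; omega
  | cons n r ih =>
    cases t with
    | zero => omega
    | succ t' =>
      have hqn : q n = true := h n (by simp)
      simp at hlen
      simp [pvLead, hqn]
      exact ih t' (by omega)
        (fun x hx => h x (by rw [List.take_succ_cons]; exact List.mem_cons_of_mem _ hx))

lemma pvAnyWin_of_le_lead (q : String → Bool) (t : Nat) (l : List String)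
    (ht : 1 ≤ t) (h : t ≤ pvLead q l) : pvAnyWin q t l = true := by
  cases l with
  | nil => simp [pvLead] at h; omega
  | cons n r =>
    have hlen : t ≤ r.length + 1 := le_trans h (by simpa using pvLead_le_length q (n :: r))
    have hall : ((n :: r).take t).all q = true := by
      rw [List.all_eq_true]; exact take_all_of_le_lead q t (n :: r) h
    simp [pvAnyWin, hlen, hall]

lemma pvWithRun_eq (q : String → Bool) (t : Nat) (ht : 1 ≤ t) (l : List String) :
    ∀ run, pvWithRun q t run l = (decide (t ≤ run + pvLead q l) || pvAnyWin q t l) := by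
  induction l with
  | nil => intro run; simp [pvWithRun, pvAnyWin, pvLead]; omega
  | cons n r ih =>
    intro run
    have hlead : pvLead q (n :: r) = if q n then pvLead q r + 1 else 0 := rfl
    by_cases hq : q n
    · rw [pvWithRun, if_pos hq, ih]
      rw [hlead, if_pos hq]
      by_cases hhead : (decide (t ≤ r.length + 1) && ((n :: r).take t).all q) = true
      · have h1 : t ≤ pvLead q (n :: r) := by
          simp only [Bool.and_eq_true, decide_eq_true_eq, List.all_eq_true] at hhead
          exact lead_ge_of_take_all q t (n :: r) (by simp; omega) hhead.2
        rw [hlead, if_pos hq] at h1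
        have hdec : decide (t ≤ run + 1 + pvLead q r) = true := by simp; omega
        simp [pvAnyWin, hhead, hdec]
      · simp only [pvAnyWin, hhead, Bool.false_or]
        rw [show run + 1 + pvLead q r = run + (pvLead q r + 1) from by omega]
    · rw [pvWithRun, if_neg hq, ih 0]
      rw [hlead, if_neg hq]
      have hhead : (decide (t ≤ r.length + 1) && ((n :: r).take t).all q) = false := by
        cases t with
        | zero => omega
        | succ t' => simp [List.all_cons, hq]
      simp only [pvAnyWin, hhead, Bool.false_or, Nat.zero_add, Nat.add_zero]
      by_cases hlead2 : t ≤ pvLead q r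
      · simp [hlead2, pvAnyWin_of_le_lead q t r ht hlead2]
      · simp [hlead2]

lemma pvAnyWin_false_of_short (q : String → Bool) (t : Nat) (l : List String)
    (h : l.length < t) : pvAnyWin q t l = false := by
  induction l with
  | nil => simp [pvAnyWin]; omega
  | cons n r ih =>
    simp at h
    simp [pvAnyWin, ih (by omega)]
    omega

lemma pvGapScan_eq_withRun (ec jt : String) (t : Nat) (ht : 1 ≤ t) (l : List String) :
    ∀ (run : Nat) (i prev total : Int), prev = i - 1 - run → total = i + l.length →
      pvGapScan ec jt (t : Int) total l i prev
        = if pvWithRun (fun n => !pvIsEntity ec jt n) t run l then 1 else 0 := by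
  induction l with
  | nil =>
    intro run i prev total hp htot
    have : ((t : Int) ≤ total - prev - 1) ↔ t ≤ run := by simp at htot; omega
    simp [pvGapScan, pvWithRun, this]
  | cons n r ih =>
    intro run i prev total hp htot
    by_cases hq : pvIsEntity ec jt n
    · have hgap : ((t : Int) ≤ i - prev - 1) ↔ t ≤ run := by omega
      by_cases hrun : t ≤ run
      · simp [pvGapScan, hq, hgap.mpr hrun, pvWithRun, hrun]
      · rw [pvGapScan, if_pos hq, if_neg (by omega),
          ih 0 (i + 1) i total (by omega) (by simp at htot ⊢; omega)]
        simp [pvWithRun, hq, hrun]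
    · rw [pvGapScan, if_neg hq,
        ih (run + 1) (i + 1) prev total (by omega) (by simp at htot ⊢; omega)]
      simp [pvWithRun, hq]

lemma anyRange_eq_anyWin (q : String → Bool) (t : Nat) (ht : 1 ≤ t) (path : List String) :
    ((PySem.List.pyRange 0 ((path.length : Int) - t + 1) 1).any (fun i =>
        (PySem.List.slice path (some i) (some (i + t))).all q))
      = pvAnyWin q t path := by
  induction path with
  | nil =>
    rw [PySem.List.pyRange_one_eq_nil (by simp; omega)]
    simp [pvAnyWin]; omega
  | cons n r ih =>
    by_cases hlen : (n :: r).length < t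
    · rw [PySem.List.pyRange_one_eq_nil (by simp at hlen ⊢; omega)]
      simp [pvAnyWin_false_of_short q t _ hlen]
    · have hlen' : t ≤ r.length + 1 := by simp at hlen; omega
      rw [PySem.List.pyRange_one_cons (by simp; omega)]
      rw [List.any_cons]
      have hhead : (PySem.List.slice (n :: r) (some 0) (some (0 + (t : Int)))).all q
          = (decide (t ≤ r.length + 1) && ((n :: r).take t).all q) := by
        rw [zero_add, PySem.List.slice_zero_start, PySem.List.slice_to _ (by omega)]
        simp [hlen']
      have htail : (PySem.List.pyRange (0 + 1) (((n :: r).length : Int) - t + 1) 1).any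
            (fun i => (PySem.List.slice (n :: r) (some i) (some (i + t))).all q)
          = (PySem.List.pyRange 0 ((r.length : Int) - t + 1) 1).any
            (fun i => (PySem.List.slice r (some i) (some (i + t))).all q) := by
        rw [PySem.List.pyRange_one (0 + 1), PySem.List.pyRange_one 0]
        rw [List.any_map, List.any_map]
        rw [show (((n :: r).length : Int) - t + 1 - (0 + 1)) = ((r.length : Int) - t + 1 - 0)
          from by simp; omega]
        apply PySem.List.any_congr_mem
        intro k _
        show (PySem.List.slice (n :: r) (some (0 + 1 + (k : Int)))
            (some (0 + 1 + (k : Int) + t))).all q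
          = (PySem.List.slice r (some (0 + (k : Int))) (some (0 + (k : Int) + t))).all q
        have c1 : (0 + 1 + (k : Int)) = ((k + 1 : Nat) : Int) := by push_cast; ring
        have c2 : (0 + 1 + (k : Int) + (t : Int)) = ((k + 1 + t : Nat) : Int) := by
          push_cast; ring
        have c3 : (0 + (k : Int)) = ((k : Nat) : Int) := by push_cast; ring
        have c4 : (0 + (k : Int) + (t : Int)) = ((k + t : Nat) : Int) := by push_cast; ring
        rw [c2, c1, c4, c3, PySem.List.slice_natCast, PySem.List.slice_natCast]
        rw [show k + 1 + t - (k + 1) = t from by omega, show k + t - k = t from by omega]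
        rw [List.drop_succ_cons]
      rw [hhead, htail, ih]
      rfl

-- final assembly
lemma main_eq (path : List String) (ec jt : String) (L : Int) :
    has_long_fuzzy_chains path ec jt L = has_long_fuzzy_chains_alt path ec jt L := by
  unfold has_long_fuzzy_chains has_long_fuzzy_chains_alt
  rw [pvFuzzyOuterF_eq_range]
  by_cases hlen : (path.length : Int) < L + 2
  · rw [if_pos hlen]
    rw [PySem.List.pyRange_one_eq_nil (by omega)]
    rfl
  · have hcast : (0 : Int) + (((path.length : Int) - L - 1).toNat : Int)
        = (path.length : Int) - L - 1 := by omega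
    rw [hcast, if_neg hlen]
    by_cases hL : L + 2 ≤ 0
    · rw [if_pos hL]
      rw [pvFuzzyOuter_eq_any]
      have hmem : (-(L + 2)) ∈ PySem.List.pyRange 0 ((path.length : Int) - L - 1) 1 := by
        rw [PySem.List.mem_pyRange_one]
        have : (0 : Int) ≤ (path.length : Int) := by omega
        constructor <;> omega
      have hnil : PySem.List.slice path (some (-(L + 2))) (some ((-(L + 2)) + L + 2)) = [] := by
        rw [show (-(L + 2)) + L + 2 = (0 : Int) from by ring]
        have hzero : (PySem.List.slice path (some (-(L + 2))) (some 0)).length = 0 := by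
          rw [PySem.List.length_slice]
          have : PySem.List.clampIdx path.length (0 : Int) = 0 := by
            rw [show (0 : Int) = ((0 : Nat) : Int) from rfl, PySem.List.clampIdx_natCast]
            simp
          omega
        exact List.eq_nil_of_length_eq_zero hzero
      have hany : (PySem.List.pyRange 0 ((path.length : Int) - L - 1) 1).any (fun i =>
          pvChainAllNonEntity ec jt
            (PySem.List.slice path (some i) (some (i + L + 2)))) = true := by
        rw [List.any_eq_true]
        exact ⟨-(L + 2), hmem, by rw [hnil]; rfl⟩
      rw [hany]
      rfl
    · rw [if_neg hL]
      have ht : 1 ≤ L + 2 := by omega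
      obtain ⟨t, hteq⟩ : ∃ t : Nat, L + 2 = (t : Int) := ⟨(L + 2).toNat, by omega⟩
      have ht1 : 1 ≤ t := by omega
      rw [pvFuzzyOuter_eq_any]
      have e1 : (path.length : Int) - L - 1 = (path.length : Int) - t + 1 := by omega
      have e2 : ∀ i : Int, i + L + 2 = i + (t : Int) := fun i => by omega
      simp only [e2, e1, pvChainAllNonEntity_eq_all]
      rw [anyRange_eq_anyWin _ t ht1 path]
      rw [hteq, pvGapScan_eq_withRun ec jt t ht1 path 0 0 (-1) ((path.length : Int))
        (by omega) (by omega)]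
      rw [pvWithRun_eq _ t ht1 path 0]
      by_cases hlead : t ≤ pvLead (fun n => !pvIsEntity ec jt n) path
      · have hwin := pvAnyWin_of_le_lead (fun n => !pvIsEntity ec jt n) t path ht1 hlead
        simp [hlead, hwin]
      · simp [hlead]

-- ===== VERDICT (by name: the statement is the Claim_ definition above) =====
theorem has_long_fuzzy_chains_spec : Claim_equal_has_long_fuzzy_chains := by
  intro path ec jt L _ _
  unfold Spec_has_long_fuzzy_chains
  exact main_eq path ec jt L
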